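-- pv_equiv track=rewrite | github.com/hongyiheng/lc-base-on-doocs | String/2211.Count Collisions on a Road/Solution.py | countCollisions
-- ===== SOURCE A (Python) =====
-- def countCollisions(directions: str) -> int:
--     n = len(directions)
--     l, r = 0, n - 1
--     for i in range(n):
--         if directions[i] == 'L':
--             l += 1
--         else:
--             break
--     for i in range(n - 1, -1, -1):
--         if directions[i] == 'R':
--             r -= 1
--         else:
--             break
--     cnt = 0
--     for i in range(l, r + 1):
--         if directions[i] == 'S':
--             cnt += 1
--     return r - l + 1 - cnt
-- ===== SOURCE B (Python) =====
-- def countCollisions(directions: str) -> int: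
--     res = 0
--     pending = 0      # right-moving cars not yet stopped
--     blocked = False  # a stopped pile exists somewhere to the left
--     for c in directions:
--         if c == 'R':
--             pending += 1
--         elif blocked or pending > 0 or c != 'L':
--             # the car stops here: the pending right-movers crash into it,
--             # and it collides itself unless it was already stationary
--             res += pending + (c != 'S')
--             pending = 0
--             blocked = True
--     return res
-- ===== Notes on version B (the rewrite author's own statement) =====
-- stated objective: alternative
-- what changed: Replaced A's three passes (trim leading 'L's, trim trailing 'R's, count stationary cars in the middle and subtract) by a single left-to-right pass that accumulates the collision count directly, keeping a counter of unresolved right-moving cars and a flag for a stopped pile to the left; a car stops unless it is a leading left-mover, contributing pending + (1 if it was moving).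
import Mathlib
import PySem

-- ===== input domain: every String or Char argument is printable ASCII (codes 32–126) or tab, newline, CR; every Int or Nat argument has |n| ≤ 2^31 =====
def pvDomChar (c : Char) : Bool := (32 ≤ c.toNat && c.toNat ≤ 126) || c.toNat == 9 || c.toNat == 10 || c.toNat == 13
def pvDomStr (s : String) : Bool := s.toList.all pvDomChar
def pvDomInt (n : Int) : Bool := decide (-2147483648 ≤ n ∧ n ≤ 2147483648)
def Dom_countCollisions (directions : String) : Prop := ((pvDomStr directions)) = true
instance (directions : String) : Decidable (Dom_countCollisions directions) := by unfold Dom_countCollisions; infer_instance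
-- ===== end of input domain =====

-- B replaces A's three passes (trim both ends, count stationary cars in the middle, subtract) by one accumulating pass: alternative decomposition, same cost.

-- ===== PORT A =====
-- first loop of A: walk from the left, l += 1 while the char is 'L', break otherwise
def aLead : List Char → Int → Int
  | [], l => l
  | c :: t, l => if c = 'L' then aLead t (l + 1) else l

-- second loop of A: walk from the right (i.e. down the reversed list), r -= 1 while the char is 'R', break otherwise
def aTrail : List Char → Int → Int
  | [], r => r
  | c :: t, r => if c = 'R' then aTrail t (r - 1) else r

def countCollisions (directions : String) : Int :=
  let cs := directions.toList
  let n : Int := cs.length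
  let l := aLead cs 0
  let r := aTrail cs.reverse (n - 1)
  -- third loop of A: for i in range(l, r+1): if directions[i] == 'S': cnt += 1  (the chars at indices l..r are the slice cs[l:r+1])
  let cnt := (PySem.List.slice cs (some l) (some (r + 1))).foldl (fun cnt c => if c = 'S' then cnt + 1 else cnt) (0 : Int)
  r - l + 1 - cnt

-- ===== PORT B =====
-- one pass; state = (res, pending, blocked) exactly as in Source B
def bStep : (Int × Int × Bool) → Char → (Int × Int × Bool)
  | (res, pending, blocked), c =>
    if c = 'R' then (res, pending + 1, blocked)
    else if blocked || pending > 0 || c ≠ 'L' then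
      (res + pending + (if c ≠ 'S' then 1 else 0), 0, true)
    else (res, pending, blocked)

def countCollisions_alt (directions : String) : Int :=
  (directions.toList.foldl bStep (0, 0, false)).1

-- ===== PRECONDITION & SPEC =====
def Spec_countCollisions (directions : String) (out : Int) : Prop := out = countCollisions_alt directions
instance (directions : String) (out : Int) : Decidable (Spec_countCollisions directions out) := by unfold Spec_countCollisions; infer_instance

-- ===== CLAIM (what is proved, stated in full; the proofs are below) =====
def Claim_equal_countCollisions : Prop := ∀ (directions : String), Dom_countCollisions directions → Spec_countCollisions directions (countCollisions directions)

-- ===== LEMMAS AND PROOFS =====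

-- cs with its trailing run of 'R's removed
def trimR : List Char → List Char
  | [] => []
  | c :: t => if c = 'R' ∧ trimR t = [] then [] else c :: trimR t

-- number of non-'S' chars, as an Int
def nonS (cs : List Char) : Int := ((cs.countP (· ≠ 'S')) : Nat)

-- the common specification both ports are reduced to
def spec (cs : List Char) : Int := nonS (trimR (cs.dropWhile (· = 'L')))

-- ---------- generic small list facts ----------

theorem dropWhile_eq_drop (p : Char → Bool) (cs : List Char) :
    cs.dropWhile p = cs.drop (cs.takeWhile p).length := by
  induction cs with
  | nil => rfl
  | cons c t ih =>
    by_cases h : p c <;> simp [List.dropWhile_cons, h, ih]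

theorem length_takeWhile_le (p : Char → Bool) (cs : List Char) :
    (cs.takeWhile p).length ≤ cs.length := by
  induction cs with
  | nil => simp
  | cons c t ih =>
    by_cases h : p c <;> simp [h] <;> omega

-- takeWhile (= 'R') ignores an all-'L' tail
theorem takeWhile_R_append_all_L (a b : List Char) (hb : ∀ c ∈ b, c = 'L') :
    (List.takeWhile (· = 'R') (a ++ b)).length = (List.takeWhile (· = 'R') a).length := by
  induction a with
  | nil =>
    cases b with
    | nil => rfl
    | cons c t =>
      have : c = 'L' := hb c (by simp)
      simp [this]
  | cons c t ih =>
    by_cases h : c = 'R' <;> simp [h, ih]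

-- ---------- characterisation of trimR ----------

theorem trimR_append_R (a : List Char) : trimR (a ++ ['R']) = trimR a := by
  induction a with
  | nil => simp [trimR]
  | cons c t ih => simp [trimR, ih]

theorem trimR_append_notR (a : List Char) (c : Char) (h : ¬ c = 'R') :
    trimR (a ++ [c]) = a ++ [c] := by
  induction a with
  | nil => simp [trimR, h]
  | cons x t ih => simp [trimR, ih]

theorem trimR_eq_take (m : List Char) :
    trimR m = m.take (m.length - (m.reverse.takeWhile (· = 'R')).length) := by
  induction m using List.reverseRecOn with
  | nil => rfl
  | append_singleton a c ih =>
    by_cases h : c = 'R'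
    · subst h
      rw [trimR_append_R, ih]
      have hta : (List.takeWhile (· = 'R') a.reverse).length ≤ a.length := by
        simpa using length_takeWhile_le (· = 'R') a.reverse
      have hlen2 : (a ++ ['R']).length - ((a ++ ['R']).reverse.takeWhile (· = 'R')).length
          = a.length - (a.reverse.takeWhile (· = 'R')).length := by
        simp [List.takeWhile_cons]
      rw [hlen2, List.take_append_of_le_length (by omega)]
    · rw [trimR_append_notR a c h]
      have h0 : ((a ++ [c]).reverse.takeWhile (· = 'R')).length = 0 := by
        simp [List.takeWhile_cons, h]
      rw [h0]
      simp

-- ---------- A-side reduction to spec ----------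

theorem aLead_eq (cs : List Char) (l : Int) :
    aLead cs l = l + ((cs.takeWhile (· = 'L')).length : Nat) := by
  induction cs generalizing l with
  | nil => simp [aLead]
  | cons c t ih =>
    by_cases h : c = 'L'
    · simp [aLead, h, ih]; ring
    · simp [aLead, h]

theorem aTrail_eq (cs : List Char) (r : Int) :
    aTrail cs r = r - ((cs.takeWhile (· = 'R')).length : Nat) := by
  induction cs generalizing r with
  | nil => simp [aTrail]
  | cons c t ih =>
    by_cases h : c = 'R'
    · simp [aTrail, h, ih]; ring
    · simp [aTrail, h]

theorem countS_foldl (cs : List Char) (a : Int) :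
    cs.foldl (fun cnt c => if c = 'S' then cnt + 1 else cnt) a
      = a + ((cs.countP (· = 'S')) : Nat) := by
  induction cs generalizing a with
  | nil => simp
  | cons c t ih =>
    by_cases h : c = 'S' <;> simp [h, ih] <;> ring

theorem countCollisions_eq_spec (s : String) : countCollisions s = spec s.toList := by
  have main : ∀ cs : List Char,
      aTrail cs.reverse ((cs.length : Int) - 1) - aLead cs 0 + 1 -
        (PySem.List.slice cs (some (aLead cs 0))
            (some (aTrail cs.reverse ((cs.length : Int) - 1) + 1))).foldl
          (fun cnt c => if c = 'S' then cnt + 1 else cnt) (0 : Int)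
      = spec cs := by
    intro cs
    rw [aLead_eq, aTrail_eq]
    set lw := (cs.takeWhile (· = 'L')).length with hlw
    set tR := (cs.reverse.takeWhile (· = 'R')).length with htR
    set m := cs.dropWhile (· = 'L') with hm
    have hml : m = cs.drop lw := by rw [hm, hlw, dropWhile_eq_drop]
    have hlen : lw + m.length = cs.length := by
      have h := congrArg List.length
        (List.takeWhile_append_dropWhile (p := fun c : Char => decide (c = 'L')) (l := cs))
      rw [List.length_append] at h
      exact h
    have hrev : cs.reverse = m.reverse ++ (cs.takeWhile (· = 'L')).reverse := by
      rw [hm, ← List.reverse_append, List.takeWhile_append_dropWhile]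
    have hTrail : tR = (m.reverse.takeWhile (· = 'R')).length := by
      rw [htR, hrev]
      exact takeWhile_R_append_all_L _ _ (by
        intro c hc
        have hc' : c ∈ cs.takeWhile (· = 'L') := by simpa using hc
        have := List.mem_takeWhile_imp hc'
        simpa using this)
    have htm_le : (m.reverse.takeWhile (· = 'R')).length ≤ m.length := by
      simpa using length_takeWhile_le (· = 'R') m.reverse
    have htR_le : tR ≤ cs.length := by omega
    -- the slice is exactly trimR m
    have h1 : ((0 : Int) + lw) = ((lw : Nat) : Int) := by push_cast; ring
    have h2 : ((cs.length : Int) - 1 - tR + 1) = (((cs.length - tR : Nat)) : Int) := by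
      push_cast [htR_le]; ring
    have hslice : PySem.List.slice cs (some ((0 : Int) + lw))
        (some ((cs.length : Int) - 1 - tR + 1)) = trimR m := by
      rw [h1, h2, PySem.List.slice_natCast, trimR_eq_take, ← hml]
      congr 1
      omega
    rw [hslice, countS_foldl]
    have hlenTrim : (trimR m).length = m.length - (m.reverse.takeWhile (· = 'R')).length := by
      rw [trimR_eq_take]
      simp [List.length_take]
    have hcount : (trimR m).countP (· ≠ 'S') + (trimR m).countP (· = 'S') = (trimR m).length := by
      have h := List.length_eq_countP_add_countP (p := fun c : Char => decide (c ≠ 'S')) (l := trimR m)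
      rw [h]
      congr 1
      apply List.countP_congr
      intro c _
      by_cases hc : c = 'S' <;> simp [hc]
    simp only [spec, ← hm, nonS]
    push_cast
    omega
  simpa [countCollisions] using main s.toList

-- ---------- B-side reduction to spec ----------

-- contribution of the rest of the string once some non-leading car exists, with `p` pending 'R's
def g : List Char → Int → Int
  | [], _ => 0
  | c :: t, p =>
    if c = 'R' then g t (p + 1)
    else if c = 'S' then p + g t 0
    else p + 1 + g t 0

theorem g_eq (cs : List Char) (p : Int) :
    g cs p = if trimR cs = [] then 0 else p + nonS (trimR cs) := by
  induction cs generalizing p with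
  | nil => simp [g, trimR]
  | cons c t ih =>
    by_cases hR : c = 'R'
    · subst hR
      simp only [g, ih]
      by_cases h0 : trimR t = []
      · simp [trimR, h0]
      · simp [trimR, h0, nonS, List.countP_cons]
        ring
    · by_cases hS : c = 'S'
      · subst hS
        simp only [g, ih]
        by_cases h0 : trimR t = [] <;>
          simp [trimR, h0, nonS, List.countP_cons, hR]
      · simp only [g, if_neg hR, if_neg hS, ih]
        by_cases h0 : trimR t = [] <;>
          simp [trimR, h0, hR, hS, nonS, List.countP_cons] <;> push_cast <;> ring

theorem foldl_bStep_g (cs : List Char) (res p : Int) (st : Bool) (h : st = true ∨ 0 < p) :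
    (cs.foldl bStep (res, p, st)).1 = res + g cs p := by
  induction cs generalizing res p st with
  | nil => simp [g]
  | cons c t ih =>
    by_cases hR : c = 'R'
    · subst hR
      rw [List.foldl_cons]
      have : bStep (res, p, st) 'R' = (res, p + 1, st) := by simp [bStep]
      rw [this, ih res (p + 1) st (by rcases h with h | h; exact Or.inl h; exact Or.inr (by omega))]
      simp [g]
    · rw [List.foldl_cons]
      have hcond : (st || decide (0 < p) || decide (c ≠ 'L')) = true := by
        rcases h with h | h <;> simp [h]
      have hstep : bStep (res, p, st) c
          = (res + p + (if c ≠ 'S' then 1 else 0), 0, true) := by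
        simp only [bStep, if_neg hR, hcond, if_true]
      rw [hstep, ih _ _ _ (Or.inl rfl)]
      by_cases hS : c = 'S' <;> simp [g, hR, hS] <;> ring

theorem foldl_bStep_start (cs : List Char) :
    (cs.foldl bStep (0, 0, false)).1 = spec cs := by
  induction cs with
  | nil => simp [spec, nonS, trimR]
  | cons c t ih =>
    by_cases hR : c = 'R'
    · subst hR
      rw [List.foldl_cons]
      have : bStep (0, 0, false) 'R' = (0, 1, false) := by decide
      have hdrop : ('R' :: t).dropWhile (· = 'L') = 'R' :: t := by simp
      rw [this, foldl_bStep_g t 0 1 false (Or.inr (by omega)), g_eq]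
      have hspec : spec ('R' :: t) = nonS (trimR ('R' :: t)) := by simp [spec, hdrop]
      rw [hspec]
      by_cases h0 : trimR t = []
      · have h1 : trimR ('R' :: t) = [] := by simp [trimR, h0]
        simp [h0, h1, nonS]
      · have h1 : trimR ('R' :: t) = 'R' :: trimR t := by simp [trimR, h0]
        rw [if_neg h0, h1]
        simp [nonS, List.countP_cons]
        push_cast; ring
    · by_cases hL : c = 'L'
      · subst hL
        rw [List.foldl_cons]
        have : bStep (0, 0, false) 'L' = (0, 0, false) := by decide
        rw [this, ih]
        simp [spec]
      · rw [List.foldl_cons]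
        have hstep : bStep (0, 0, false) c
            = ((0 : Int) + 0 + (if c ≠ 'S' then 1 else 0), 0, true) := by
          simp only [bStep, if_neg hR]
          have hc : ((false : Bool) || decide ((0:Int) > 0) || decide (c ≠ 'L')) = true := by
            simp [hL]
          simp only [hc, if_true]
        rw [hstep, foldl_bStep_g t _ 0 true (Or.inl rfl), g_eq]
        have hdrop : (c :: t).dropWhile (· = 'L') = c :: t := by simp [hL]
        have hspec : spec (c :: t) = nonS (trimR (c :: t)) := by simp [spec, hdrop]
        rw [hspec]
        have h1 : trimR (c :: t) = c :: trimR t := by simp [trimR, hR]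
        rw [h1]
        by_cases h0 : trimR t = [] <;> by_cases hS : c = 'S' <;>
          simp [h0, hS, nonS, List.countP_cons] <;> push_cast <;> ring

-- ===== VERDICT (by name: the statement is the Claim_ definition above) =====
theorem countCollisions_spec : Claim_equal_countCollisions := by
  intro s _
  unfold Spec_countCollisions countCollisions_alt
  rw [foldl_bStep_start, countCollisions_eq_spec]
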